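-- pv_equiv track=rewrite | github.com/HanzoRazer/string_master_v.4.0 | scripts/cbsp21/check_patch_packet_format.py | has_ellipsis_inside_code_fence
-- ===== SOURCE A (Python) =====
-- def has_ellipsis_inside_code_fence(text: str) -> bool:
--     in_fence = False
--     for line in text.splitlines():
--         if line.strip().startswith("```"):
--             in_fence = not in_fence
--             continue
--         if in_fence and line.strip() == "...":
--             return True
--     return False
-- ===== SOURCE B (Python) =====
-- def has_ellipsis_inside_code_fence(text: str) -> bool:
--     lines = [ln.strip() for ln in text.splitlines()]
--     return any(
--         ln == "..."
--         and sum(1 for m in lines[:i] if m.startswith("```")) % 2 == 1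
--         for i, ln in enumerate(lines)
--     )
-- ===== Notes on version B (the rewrite author's own statement) =====
-- stated objective: alternative
-- what changed: Replaces the stateful in_fence toggle scan with a declarative closed form: a stripped line counts iff it is an ellipsis line and the number of fence lines preceding it is odd.
import Mathlib
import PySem

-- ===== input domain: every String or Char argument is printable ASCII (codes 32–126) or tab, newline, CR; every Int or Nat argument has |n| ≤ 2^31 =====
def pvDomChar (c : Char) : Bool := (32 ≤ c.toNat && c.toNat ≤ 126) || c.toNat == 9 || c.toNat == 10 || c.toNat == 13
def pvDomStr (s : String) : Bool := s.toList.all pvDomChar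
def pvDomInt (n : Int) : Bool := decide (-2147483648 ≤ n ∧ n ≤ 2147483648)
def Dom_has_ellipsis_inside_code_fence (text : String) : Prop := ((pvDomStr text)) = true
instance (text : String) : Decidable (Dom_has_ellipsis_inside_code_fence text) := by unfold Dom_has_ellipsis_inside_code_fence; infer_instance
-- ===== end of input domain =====

-- B replaces A's stateful in_fence toggle scan by a per-line closed form (a stripped ellipsis line
-- preceded by an odd number of fence lines); objective: alternative decomposition, not claimed faster.


-- ===== PORT A =====
-- A's for-loop with its in_fence flag and early return, as structural recursion on the lines.
def pvLoopA : List String → Bool → Bool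
  | [], _ => false
  | l :: rest, f =>
    if PySem.Str.startswith (PySem.Str.strip l) "```" then pvLoopA rest (!f)
    else if f && (PySem.Str.strip l == "...") then true
    else pvLoopA rest f

def has_ellipsis_inside_code_fence (text : String) : Bool :=
  pvLoopA (PySem.Str.splitlines text) false

-- ===== PORT B =====
def has_ellipsis_inside_code_fence_alt (text : String) : Bool :=
  let lines := (PySem.Str.splitlines text).map PySem.Str.strip
  (PySem.List.enumerate lines 0).any (fun p =>
    p.2 == "..." &&
      ((PySem.List.slice lines none (some p.1)).countP
        (fun m => PySem.Str.startswith m "```")) % 2 == 1)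

-- ===== PRECONDITION & SPEC =====
def Spec_has_ellipsis_inside_code_fence (text : String) (out : Bool) : Prop := out = has_ellipsis_inside_code_fence_alt text
instance (text : String) (out : Bool) : Decidable (Spec_has_ellipsis_inside_code_fence text out) := by unfold Spec_has_ellipsis_inside_code_fence; infer_instance

-- ===== CLAIM (what is proved, stated in full; the proofs are below) =====
def Claim_equal_has_ellipsis_inside_code_fence : Prop := ∀ (text : String), Dom_has_ellipsis_inside_code_fence text → Spec_has_ellipsis_inside_code_fence text (has_ellipsis_inside_code_fence text)

-- ===== LEMMAS AND PROOFS =====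

-- Index-free intermediate form: scan the (stripped) lines carrying the number of fences seen so far.
def pvAnyOdd : List String → Nat → Bool
  | [], _ => false
  | l :: rest, c =>
    ((l == "...") && c % 2 == 1) ||
      pvAnyOdd rest (c + if PySem.Str.startswith l "```" then 1 else 0)

theorem pv_fence_not_dots (s : String) (h : PySem.Str.startswith s "```" = true) :
    (s == "...") = false := by
  cases hbe : (s == "...") with
  | false => rfl
  | true =>
    have hs : s = "..." := eq_of_beq hbe
    subst hs
    exact absurd h (by decide)

theorem pv_parity_succ (c : Nat) : (((c + 1) % 2 == 1) : Bool) = !(c % 2 == 1) := by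
  rcases Nat.mod_two_eq_zero_or_one c with h | h <;> simp [Nat.add_mod, h]

-- B's enumerate/slice scan equals the index-free scan, generalizing over the consumed prefix.
theorem pv_B_eq_anyOdd (post pre : List String) :
    (PySem.List.enumerate post (pre.length : Int)).any (fun p =>
        p.2 == "..." &&
          ((PySem.List.slice (pre ++ post) none (some p.1)).countP
            (fun m => PySem.Str.startswith m "```")) % 2 == 1)
      = pvAnyOdd post (pre.countP (fun m => PySem.Str.startswith m "```")) := by
  induction post generalizing pre with
  | nil => simp [PySem.List.enumerate_nil, pvAnyOdd]
  | cons l rest ih =>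
    rw [PySem.List.enumerate_cons]
    have hslice : PySem.List.slice (pre ++ l :: rest) none (some (pre.length : Int)) = pre := by
      rw [PySem.List.slice_to_natCast]
      exact List.take_left
    have harg : ((pre.length : Int) + 1) = (((pre ++ [l]).length : Nat) : Int) := by
      simp
    have hlist : pre ++ l :: rest = (pre ++ [l]) ++ rest := by simp
    rw [List.any_cons, hslice, harg, hlist, ih (pre ++ [l])]
    have hcount : (pre ++ [l]).countP (fun m => PySem.Str.startswith m "```")
        = pre.countP (fun m => PySem.Str.startswith m "```")
          + if PySem.Str.startswith l "```" then 1 else 0 := by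
      simp [List.countP_append, List.countP_cons]
    rw [hcount, pvAnyOdd]

-- A's loop equals the index-free scan: the flag is the parity of the fence count.
theorem pv_A_eq_anyOdd (ls : List String) (c : Nat) :
    pvLoopA ls (c % 2 == 1) = pvAnyOdd (ls.map PySem.Str.strip) c := by
  induction ls generalizing c with
  | nil => simp [pvLoopA, pvAnyOdd]
  | cons l rest ih =>
    rw [List.map_cons, pvAnyOdd, pvLoopA]
    by_cases hF : PySem.Str.startswith (PySem.Str.strip l) "```" = true
    · rw [if_pos hF]
      simp only [pv_fence_not_dots _ hF, Bool.false_and, Bool.false_or, hF, reduceIte]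
      rw [← pv_parity_succ c]
      exact ih (c + 1)
    · have hF' : PySem.Str.startswith (PySem.Str.strip l) "```" = false := by
        simpa using hF
      rw [if_neg hF]
      simp only [hF', Bool.false_eq_true, reduceIte, Nat.add_zero]
      cases hD : (PySem.Str.strip l == "...") <;> cases hp : ((c % 2 == 1) : Bool)
      · simpa [hD, hp] using ih c
      · simpa [hD, hp] using ih c
      · simpa [hD, hp] using ih c
      · simp

-- ===== VERDICT (by name: the statement is the Claim_ definition above) =====
theorem has_ellipsis_inside_code_fence_spec : Claim_equal_has_ellipsis_inside_code_fence := by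
  intro text _
  unfold Spec_has_ellipsis_inside_code_fence has_ellipsis_inside_code_fence has_ellipsis_inside_code_fence_alt
  have h := pv_B_eq_anyOdd ((PySem.Str.splitlines text).map PySem.Str.strip) []
  simp only [List.length_nil, Nat.cast_zero, List.nil_append, List.countP_nil] at h
  rw [h, ← pv_A_eq_anyOdd (PySem.Str.splitlines text) 0]
  rfl
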